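-- pv_equiv track=rewrite | github.com/dewdropperaa/FraudLens | claimguard/v2/orchestrator.py | _classify_flags
-- ===== SOURCE A (Python) =====
-- from typing import Any, Dict, List, Literal, Tuple
--
-- def _classify_flags(system_flags: List[str]) -> Dict[str, List[str]]:
--     # PROD-FIX: tiered classification for auditability.
--     blocking = {
--         "INJECTION_DETECTED",
--         "IDENTITY_HARD_FAIL",
--         "CRITICAL_FIELD_MISSING",
--         "AMOUNT_MISMATCH_CRITICAL",
--     }
--     informational = {
--         "MEMORY_DISABLED",
--         "DEGRADED_SECURITY_MODE",
--         "LLM_LAYER2_DISABLED",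
--     }
--     warnings = {
--         "UNVERIFIED_FIELDS_PRESENT",
--         "IDENTITY_SOFT_FAIL_CONTINUE",
--         "LOW_TS_VALIDATION_GRACEFUL_DEGRADE",
--         "DECISION_STABILITY_FAIL",
--     }
--     out = {"blocking": [], "warnings": [], "informational": []}
--     for flag in sorted(set(system_flags or [])):
--         if flag in blocking:
--             out["blocking"].append(flag)
--         elif flag in informational:
--             out["informational"].append(flag)
--         elif flag in warnings:
--             out["warnings"].append(flag)
--     return out
-- ===== SOURCE B (Python) =====
-- # Table-driven: the classification is a fixed alphabetically pre-sorted (flag, tier) table;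
-- # one pass over the table appends each flag present in the input set -- no runtime sort at all.
-- _TABLE = [
--     ("AMOUNT_MISMATCH_CRITICAL", "blocking"),
--     ("CRITICAL_FIELD_MISSING", "blocking"),
--     ("DECISION_STABILITY_FAIL", "warnings"),
--     ("DEGRADED_SECURITY_MODE", "informational"),
--     ("IDENTITY_HARD_FAIL", "blocking"),
--     ("IDENTITY_SOFT_FAIL_CONTINUE", "warnings"),
--     ("INJECTION_DETECTED", "blocking"),
--     ("LLM_LAYER2_DISABLED", "informational"),
--     ("LOW_TS_VALIDATION_GRACEFUL_DEGRADE", "warnings"),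
--     ("MEMORY_DISABLED", "informational"),
--     ("UNVERIFIED_FIELDS_PRESENT", "warnings"),
-- ]
--
-- def _classify_flags(system_flags):
--     present = set(system_flags)
--     out = {"blocking": [], "warnings": [], "informational": []}
--     for flag, tier in _TABLE:
--         if flag in present:
--             out[tier].append(flag)
--     return out
-- ===== Notes on version B (the rewrite author's own statement) =====
-- stated objective: faster
-- what changed: Replaces A's runtime sort of the deduplicated flags followed by a distributing if/elif loop with a table-driven single pass: a fixed alphabetically pre-sorted (flag, tier) classification table is scanned once and each flag present in the input set is appended to its tier, so no sorting happens at runtime.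
import Mathlib
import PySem

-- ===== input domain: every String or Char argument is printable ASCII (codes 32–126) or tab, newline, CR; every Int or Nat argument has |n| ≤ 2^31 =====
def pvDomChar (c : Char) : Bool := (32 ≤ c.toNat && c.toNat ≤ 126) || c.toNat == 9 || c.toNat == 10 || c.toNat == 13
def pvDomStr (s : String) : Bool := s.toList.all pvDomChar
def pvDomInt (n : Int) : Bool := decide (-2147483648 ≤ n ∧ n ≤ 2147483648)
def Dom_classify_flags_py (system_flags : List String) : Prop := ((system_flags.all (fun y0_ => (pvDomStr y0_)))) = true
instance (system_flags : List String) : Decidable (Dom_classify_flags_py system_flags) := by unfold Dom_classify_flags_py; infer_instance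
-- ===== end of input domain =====

-- B replaces A's runtime sort + distributing if/elif loop by one pass over a fixed
-- pre-sorted (flag, tier) classification table (alternative, table-driven decomposition).

-- ===== PORT A =====
def pvBlockingA : PySem.Set String :=
  PySem.Set.ofList ["INJECTION_DETECTED", "IDENTITY_HARD_FAIL", "CRITICAL_FIELD_MISSING", "AMOUNT_MISMATCH_CRITICAL"]
def pvInformationalA : PySem.Set String :=
  PySem.Set.ofList ["MEMORY_DISABLED", "DEGRADED_SECURITY_MODE", "LLM_LAYER2_DISABLED"]
def pvWarningsA : PySem.Set String :=
  PySem.Set.ofList ["UNVERIFIED_FIELDS_PRESENT", "IDENTITY_SOFT_FAIL_CONTINUE", "LOW_TS_VALIDATION_GRACEFUL_DEGRADE", "DECISION_STABILITY_FAIL"]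

-- A: sort the deduplicated flags once, then distribute each flag by the if/elif chain
-- into the three buckets (state = the three bucket lists in dict order blocking/warnings/informational).
def classify_flags_py (system_flags : List String) : List (String × List String) :=
  let out :=
    (PySem.List.sorted (PySem.Set.ofList system_flags) (fun x => x)).foldl
      (fun (acc : List String × List String × List String) flag =>
        if PySem.Set.contains pvBlockingA flag then (acc.1 ++ [flag], acc.2.1, acc.2.2)
        else if PySem.Set.contains pvInformationalA flag then (acc.1, acc.2.1, acc.2.2 ++ [flag])
        else if PySem.Set.contains pvWarningsA flag then (acc.1, acc.2.1 ++ [flag], acc.2.2)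
        else acc)
      ([], [], [])
  [("blocking", out.1), ("warnings", out.2.1), ("informational", out.2.2)]

-- ===== PORT B =====
-- the fixed alphabetically pre-sorted classification table of Source B
def pvTableB : List (String × String) :=
  [("AMOUNT_MISMATCH_CRITICAL", "blocking"),
   ("CRITICAL_FIELD_MISSING", "blocking"),
   ("DECISION_STABILITY_FAIL", "warnings"),
   ("DEGRADED_SECURITY_MODE", "informational"),
   ("IDENTITY_HARD_FAIL", "blocking"),
   ("IDENTITY_SOFT_FAIL_CONTINUE", "warnings"),
   ("INJECTION_DETECTED", "blocking"),
   ("LLM_LAYER2_DISABLED", "informational"),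
   ("LOW_TS_VALIDATION_GRACEFUL_DEGRADE", "warnings"),
   ("MEMORY_DISABLED", "informational"),
   ("UNVERIFIED_FIELDS_PRESENT", "warnings")]

-- B: one pass over the table; each flag present in the input set goes to its tier's bucket.
def classify_flags_py_alt (system_flags : List String) : List (String × List String) :=
  let present : PySem.Set String := PySem.Set.ofList system_flags
  let out :=
    pvTableB.foldl
      (fun (acc : List String × List String × List String) e =>
        if PySem.Set.contains present e.1 then
          (if e.2 == "blocking" then (acc.1 ++ [e.1], acc.2.1, acc.2.2)
           else if e.2 == "warnings" then (acc.1, acc.2.1 ++ [e.1], acc.2.2)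
           else (acc.1, acc.2.1, acc.2.2 ++ [e.1]))
        else acc)
      ([], [], [])
  [("blocking", out.1), ("warnings", out.2.1), ("informational", out.2.2)]

-- ===== PRECONDITION & SPEC =====
def Spec_classify_flags_py (system_flags : List String) (out : List (String × List String)) : Prop := out = classify_flags_py_alt system_flags
instance (system_flags : List String) (out : List (String × List String)) : Decidable (Spec_classify_flags_py system_flags out) := by unfold Spec_classify_flags_py; infer_instance

-- ===== CLAIM (what is proved, stated in full; the proofs are below) =====
def Claim_equal_classify_flags_py : Prop := ∀ (system_flags : List String), Dom_classify_flags_py system_flags → Spec_classify_flags_py system_flags (classify_flags_py system_flags)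

-- ===== LEMMAS AND PROOFS =====

-- The three literal flag sets are pairwise disjoint, so A's elif chain tests the same
-- effective predicate as plain membership in the respective set.
lemma pv_eff_info (f : String) :
    ((!decide (f ∈ pvBlockingA)) && decide (f ∈ pvInformationalA)) = decide (f ∈ pvInformationalA) := by
  by_cases h : f ∈ pvInformationalA
  · have h' : f = "MEMORY_DISABLED" ∨ f = "DEGRADED_SECURITY_MODE" ∨ f = "LLM_LAYER2_DISABLED" := by
      simpa [pvInformationalA] using h
    rcases h' with rfl | rfl | rfl <;> decide
  · simp [h]

lemma pv_eff_warn (f : String) :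
    ((!decide (f ∈ pvBlockingA)) && ((!decide (f ∈ pvInformationalA)) && decide (f ∈ pvWarningsA)))
      = decide (f ∈ pvWarningsA) := by
  by_cases h : f ∈ pvWarningsA
  · have h' : f = "UNVERIFIED_FIELDS_PRESENT" ∨ f = "IDENTITY_SOFT_FAIL_CONTINUE" ∨
        f = "LOW_TS_VALIDATION_GRACEFUL_DEGRADE" ∨ f = "DECISION_STABILITY_FAIL" := by
      simpa [pvWarningsA] using h
    rcases h' with rfl | rfl | rfl | rfl <;> decide
  · simp [h]

-- A's distributing fold computes the three filtered sublists of the traversed list.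
lemma pv_fold_eq (l : List String) (b w i : List String) :
    l.foldl
      (fun (acc : List String × List String × List String) flag =>
        if flag ∈ pvBlockingA then (acc.1 ++ [flag], acc.2)
        else if flag ∈ pvInformationalA then (acc.1, acc.2.1, acc.2.2 ++ [flag])
        else if flag ∈ pvWarningsA then (acc.1, acc.2.1 ++ [flag], acc.2.2)
        else acc)
      (b, w, i)
    = (b ++ l.filter (fun f => decide (f ∈ pvBlockingA)),
       w ++ l.filter (fun f => (!decide (f ∈ pvBlockingA)) && ((!decide (f ∈ pvInformationalA)) && decide (f ∈ pvWarningsA))),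
       i ++ l.filter (fun f => (!decide (f ∈ pvBlockingA)) && decide (f ∈ pvInformationalA))) := by
  induction l generalizing b w i with
  | nil => simp
  | cons x xs ih =>
    by_cases hb : x ∈ pvBlockingA
    · simp [List.foldl_cons, hb, ih]
    · by_cases hi : x ∈ pvInformationalA
      · simp [List.foldl_cons, hb, hi, ih]
      · by_cases hw : x ∈ pvWarningsA
        · simp [List.foldl_cons, hb, hi, hw, ih]
        · simp [List.foldl_cons, hb, hi, hw, ih]

-- B's table pass computes, per tier, the present flags of the table entries of that tier.
lemma pv_fold_tbl (tbl : List (String × String)) (S : List String) (b w i : List String) :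
    tbl.foldl
      (fun (acc : List String × List String × List String) e =>
        if e.1 ∈ S then
          (if e.2 == "blocking" then (acc.1 ++ [e.1], acc.2.1, acc.2.2)
           else if e.2 == "warnings" then (acc.1, acc.2.1 ++ [e.1], acc.2.2)
           else (acc.1, acc.2.1, acc.2.2 ++ [e.1]))
        else acc)
      (b, w, i)
    = (b ++ ((tbl.filter (fun e => decide (e.1 ∈ S) && (e.2 == "blocking"))).map Prod.fst),
       w ++ ((tbl.filter (fun e => decide (e.1 ∈ S) && ((!(e.2 == "blocking")) && (e.2 == "warnings")))).map Prod.fst),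
       i ++ ((tbl.filter (fun e => decide (e.1 ∈ S) && ((!(e.2 == "blocking")) && (!(e.2 == "warnings"))))).map Prod.fst)) := by
  induction tbl generalizing b w i with
  | nil => simp
  | cons x xs ih =>
    simp only [List.foldl_cons]
    by_cases hm : x.1 ∈ S
    · by_cases hb : (x.2 == "blocking") = true
      · rw [if_pos hm, if_pos hb, ih]
        simp [hm, hb]
      · by_cases hw : (x.2 == "warnings") = true
        · rw [if_pos hm, if_neg hb, if_pos hw, ih]
          simp [hm, hb, hw]
        · rw [if_pos hm, if_neg hb, if_neg hw, ih]
          simp [hm, hb, hw]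
    · rw [if_neg hm, ih]
      simp [hm]

-- evaluating the per-tier table filters: the table's second components are literals,
-- so each tier filter collapses to filtering the tier's sorted flag list.
lemma pv_tbl_b (S : List String) :
    ((pvTableB.filter (fun e => decide (e.1 ∈ S) && (e.2 == "blocking"))).map Prod.fst)
      = ["AMOUNT_MISMATCH_CRITICAL", "CRITICAL_FIELD_MISSING", "IDENTITY_HARD_FAIL", "INJECTION_DETECTED"].filter (fun f => decide (f ∈ S)) := by
  by_cases h1 : "AMOUNT_MISMATCH_CRITICAL" ∈ S <;> by_cases h2 : "CRITICAL_FIELD_MISSING" ∈ S <;>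
    by_cases h3 : "IDENTITY_HARD_FAIL" ∈ S <;> by_cases h4 : "INJECTION_DETECTED" ∈ S <;>
    simp [pvTableB, h1, h2, h3, h4]

lemma pv_tbl_w (S : List String) :
    ((pvTableB.filter (fun e => decide (e.1 ∈ S) && ((!(e.2 == "blocking")) && (e.2 == "warnings")))).map Prod.fst)
      = ["DECISION_STABILITY_FAIL", "IDENTITY_SOFT_FAIL_CONTINUE", "LOW_TS_VALIDATION_GRACEFUL_DEGRADE", "UNVERIFIED_FIELDS_PRESENT"].filter (fun f => decide (f ∈ S)) := by
  by_cases h1 : "DECISION_STABILITY_FAIL" ∈ S <;> by_cases h2 : "IDENTITY_SOFT_FAIL_CONTINUE" ∈ S <;>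
    by_cases h3 : "LOW_TS_VALIDATION_GRACEFUL_DEGRADE" ∈ S <;> by_cases h4 : "UNVERIFIED_FIELDS_PRESENT" ∈ S <;>
    simp [pvTableB, h1, h2, h3, h4]

lemma pv_tbl_i (S : List String) :
    ((pvTableB.filter (fun e => decide (e.1 ∈ S) && ((!(e.2 == "blocking")) && (!(e.2 == "warnings"))))).map Prod.fst)
      = ["DEGRADED_SECURITY_MODE", "LLM_LAYER2_DISABLED", "MEMORY_DISABLED"].filter (fun f => decide (f ∈ S)) := by
  by_cases h1 : "DEGRADED_SECURITY_MODE" ∈ S <;> by_cases h2 : "LLM_LAYER2_DISABLED" ∈ S <;>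
    by_cases h3 : "MEMORY_DISABLED" ∈ S <;> simp [pvTableB, h1, h2, h3]

-- (PySem.Set.ofList xs) has no duplicates.
lemma pv_nodup_ofList (xs : List String) : (PySem.Set.ofList xs).Nodup := by
  rw [← PySem.List.dedup_eq_ofList]; exact PySem.List.nodup_dedup xs

-- sorting the present-set filtered by a bucket set = filtering the bucket's strictly
-- sorted literal flag list by presence (same nodup elements, right side strictly increasing).
lemma pv_bucket_eq (xs : List String) (lit : List String) (bset : List String)
    (hnd : lit.Nodup) (hlt : lit.Pairwise (· < ·)) (hiff : ∀ f, f ∈ lit ↔ f ∈ bset) :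
    PySem.List.sorted ((PySem.Set.ofList xs).filter (fun f => decide (f ∈ bset))) (fun x => x)
      = lit.filter (fun f => decide (f ∈ PySem.Set.ofList xs)) := by
  apply PySem.List.sorted_eq_of_perm_of_pairwise_lt
  · rw [List.perm_ext_iff_of_nodup (hnd.filter _) ((pv_nodup_ofList xs).filter _)]
    intro a
    simp only [List.mem_filter, decide_eq_true_eq]
    constructor
    · rintro ⟨h1, h2⟩; exact ⟨h2, (hiff a).mp h1⟩
    · rintro ⟨h1, h2⟩; exact ⟨(hiff a).mpr h2, h1⟩
  · exact List.Pairwise.sublist List.filter_sublist hlt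

-- filtering the sorted dedup list IS sorting the filtered dedup list (elements distinct).
lemma pv_sorted_filter (xs : List String) (p : String → Bool) :
    (PySem.List.sorted (PySem.Set.ofList xs) (fun x => x)).filter p
      = PySem.List.sorted ((PySem.Set.ofList xs).filter p) (fun x => x) := by
  refine (PySem.List.sorted_eq_of_perm_of_pairwise_lt _ _ _ ?_ ?_).symm
  · exact List.Perm.filter p (PySem.List.sorted_perm (PySem.Set.ofList xs) (fun x => x) false)
  · exact List.Pairwise.sublist List.filter_sublist (PySem.List.sorted_ofList_pairwise_lt xs)

-- literal string lists are strictly increasing (checked on the character lists).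
lemma pv_lt_of_toList (l : List String) (h : l.Pairwise (fun a b => a.toList < b.toList)) :
    l.Pairwise (· < ·) :=
  h.imp (fun hab => String.lt_iff_toList_lt.mpr hab)

lemma pv_lt_b : ["AMOUNT_MISMATCH_CRITICAL", "CRITICAL_FIELD_MISSING", "IDENTITY_HARD_FAIL", "INJECTION_DETECTED"].Pairwise (· < ·) :=
  pv_lt_of_toList _ (by decide)

lemma pv_lt_w : ["DECISION_STABILITY_FAIL", "IDENTITY_SOFT_FAIL_CONTINUE", "LOW_TS_VALIDATION_GRACEFUL_DEGRADE", "UNVERIFIED_FIELDS_PRESENT"].Pairwise (· < ·) :=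
  pv_lt_of_toList _ (by decide)

lemma pv_lt_i : ["DEGRADED_SECURITY_MODE", "LLM_LAYER2_DISABLED", "MEMORY_DISABLED"].Pairwise (· < ·) :=
  pv_lt_of_toList _ (by decide)

-- ===== VERDICT (by name: the statement is the Claim_ definition above) =====
theorem classify_flags_py_spec : Claim_equal_classify_flags_py := by
  intro system_flags _
  unfold Spec_classify_flags_py classify_flags_py classify_flags_py_alt
  simp only [PySem.Set.contains, List.contains_eq_mem, decide_eq_true_eq]
  rw [pv_fold_eq, pv_fold_tbl]
  simp only [List.nil_append]
  rw [List.filter_congr (fun f _ => pv_eff_warn f),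
      List.filter_congr (fun f _ => pv_eff_info f),
      pv_sorted_filter, pv_sorted_filter, pv_sorted_filter]
  rw [pv_tbl_b, pv_tbl_w, pv_tbl_i]
  rw [pv_bucket_eq system_flags ["AMOUNT_MISMATCH_CRITICAL", "CRITICAL_FIELD_MISSING", "IDENTITY_HARD_FAIL", "INJECTION_DETECTED"] pvBlockingA (by decide) pv_lt_b
        (by intro f; rw [show pvBlockingA = ["INJECTION_DETECTED", "IDENTITY_HARD_FAIL", "CRITICAL_FIELD_MISSING", "AMOUNT_MISMATCH_CRITICAL"] from rfl]; simp; tauto),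
      pv_bucket_eq system_flags ["DECISION_STABILITY_FAIL", "IDENTITY_SOFT_FAIL_CONTINUE", "LOW_TS_VALIDATION_GRACEFUL_DEGRADE", "UNVERIFIED_FIELDS_PRESENT"] pvWarningsA (by decide) pv_lt_w
        (by intro f; rw [show pvWarningsA = ["UNVERIFIED_FIELDS_PRESENT", "IDENTITY_SOFT_FAIL_CONTINUE", "LOW_TS_VALIDATION_GRACEFUL_DEGRADE", "DECISION_STABILITY_FAIL"] from rfl]; simp; tauto),
      pv_bucket_eq system_flags ["DEGRADED_SECURITY_MODE", "LLM_LAYER2_DISABLED", "MEMORY_DISABLED"] pvInformationalA (by decide) pv_lt_i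
        (by intro f; rw [show pvInformationalA = ["MEMORY_DISABLED", "DEGRADED_SECURITY_MODE", "LLM_LAYER2_DISABLED"] from rfl]; simp; tauto)]
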